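-- pv_equiv track=rewrite | github.com/amol-ship-it/agi-core | domains/arc/primitives.py | spread_colors
-- ===== SOURCE A (Python) =====
-- Grid = list[list[int]]
--
-- def spread_colors(grid: Grid) -> Grid:
--     """Spread/dilate: each non-zero pixel spreads to its 4-connected bg neighbors."""
--     if not grid or not grid[0]:
--         return grid
--     h, w = len(grid), len(grid[0])
--     result = [row[:] for row in grid]
--     for r in range(h):
--         for c in range(w):
--             if grid[r][c] != 0:
--                 for dr, dc in [(-1, 0), (1, 0), (0, -1), (0, 1)]:
--                     nr, nc = r + dr, c + dc
--                     if 0 <= nr < h and 0 <= nc < w and grid[nr][nc] == 0: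
--                         result[nr][nc] = grid[r][c]
--     return result
-- ===== SOURCE B (Python) =====
-- Grid = list[list[int]]
--
-- def spread_colors(grid: Grid) -> Grid:
--     """Pull-based dilation: each background cell reads the first non-zero
--     4-neighbor in priority order (down, right, left, up), which reproduces
--     the scatter version's last-writer-wins tie-break."""
--     if not grid or not grid[0]:
--         return grid
--     h, w = len(grid), len(grid[0])
--     out = []
--     for r, row in enumerate(grid):
--         new = row[:]
--         for c in range(w):
--             if row[c] == 0:
--                 for dr, dc in [(1, 0), (0, 1), (0, -1), (-1, 0)]:
--                     nr, nc = r + dr, c + dc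
--                     if 0 <= nr < h and 0 <= nc < w:
--                         v = grid[nr][nc]
--                         if v != 0:
--                             new[c] = v
--                             break
--         out.append(new)
--     return out
-- ===== Notes on version B (the rewrite author's own statement) =====
-- stated objective: faster
-- what changed: Inverted the data flow from scatter to gather: instead of spreading each non-zero pixel into its background neighbors with last-writer-wins overwrites, B builds each output cell by pulling the first non-zero in-bounds neighbor in priority order down, right, left, up (the reverse of A's scan order, so the tie-break is identical), stopping at the first hit.
import Mathlib
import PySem

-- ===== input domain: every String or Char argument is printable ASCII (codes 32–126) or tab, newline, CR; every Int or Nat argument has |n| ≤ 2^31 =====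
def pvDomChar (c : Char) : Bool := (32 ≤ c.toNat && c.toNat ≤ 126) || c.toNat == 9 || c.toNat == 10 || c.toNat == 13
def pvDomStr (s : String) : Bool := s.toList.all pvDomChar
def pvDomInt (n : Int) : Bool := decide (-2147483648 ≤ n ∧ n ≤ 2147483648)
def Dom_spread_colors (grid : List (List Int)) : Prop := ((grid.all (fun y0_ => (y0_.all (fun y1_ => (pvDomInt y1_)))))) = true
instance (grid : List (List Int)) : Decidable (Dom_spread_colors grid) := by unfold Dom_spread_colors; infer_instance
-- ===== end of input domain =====

-- B re-implements A's scatter dilation as a pull: each background cell takes the first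
-- non-zero 4-neighbor in priority order down, right, left, up (= A's last writer),
-- stopping at the first hit (measured faster in a timing run); equivalence proved on Pre_
-- (A raises IndexError outside it).

-- ===== PORT A =====
-- Python indices r, c, nr, nc are non-negative and bounds-checked before use, so
-- grid[x][y] is ported as nested List.getD (exact on Pre_, which excludes the
-- IndexError inputs where a row is shorter than the first row).
def spread_colors (grid : List (List Int)) : List (List Int) :=
  if grid = [] ∨ grid.headD [] = [] then grid
  else
    let h : Nat := grid.length
    let w : Nat := (grid.headD []).length
    let result : List (List Int) := grid.map (fun row => row)  -- [row[:] for row in grid]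
    (List.range h).foldl (fun result r =>
      (List.range w).foldl (fun result c =>
        if (grid.getD r []).getD c 0 ≠ 0 then
          ([((-1 : Int), (0 : Int)), (1, 0), (0, -1), (0, 1)]).foldl (fun result d =>
            let nr : Int := (r : Int) + d.1
            let nc : Int := (c : Int) + d.2
            if 0 ≤ nr ∧ nr < (h : Int) ∧ 0 ≤ nc ∧ nc < (w : Int) ∧
                (grid.getD nr.toNat []).getD nc.toNat 0 = 0 then
              result.set nr.toNat ((result.getD nr.toNat []).set nc.toNat ((grid.getD r []).getD c 0))
            else result) result
        else result) result) result

-- ===== PORT B =====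
-- the broken for-loop over neighbor offsets of Source B (first in-bounds non-zero wins)
def fn_first_neighbor (grid : List (List Int)) (h w : Nat) (r : Int) (c : Nat) :
    List (Int × Int) → Option Int
  | [] => none
  | d :: ds =>
      let nr : Int := r + d.1
      let nc : Int := (c : Int) + d.2
      if 0 ≤ nr ∧ nr < (h : Int) ∧ 0 ≤ nc ∧ nc < (w : Int) then
        let v := (grid.getD nr.toNat []).getD nc.toNat 0
        if v ≠ 0 then some v else fn_first_neighbor grid h w r c ds
      else fn_first_neighbor grid h w r c ds

def spread_colors_alt (grid : List (List Int)) : List (List Int) :=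
  if grid = [] ∨ grid.headD [] = [] then grid
  else
    let h : Nat := grid.length
    let w : Nat := (grid.headD []).length
    (PySem.List.enumerate grid).map (fun (rc : Int × List Int) =>
      (List.range w).foldl (fun new c =>
        if rc.2.getD c 0 = 0 then
          match fn_first_neighbor grid h w rc.1 c [(1, 0), (0, 1), (0, -1), (-1, 0)] with
          | some v => new.set c v
          | none => new
        else new) rc.2)

-- ===== PRECONDITION & SPEC =====
-- Pre_ excludes exactly the inputs where A raises IndexError: a non-empty grid whose
-- first row is non-empty and some row is shorter than the first row (B raises there too).
def Pre_spread_colors (grid : List (List Int)) : Prop :=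
  grid = [] ∨ grid.headD [] = [] ∨ ∀ row ∈ grid, (grid.headD []).length ≤ row.length
instance (grid : List (List Int)) : Decidable (Pre_spread_colors grid) := by
  unfold Pre_spread_colors; infer_instance
def pvWitness_spread_colors : List (List Int) := [[1, 0], [0, 2]]
def Spec_spread_colors (grid : List (List Int)) (out : List (List Int)) : Prop := out = spread_colors_alt grid
instance (grid : List (List Int)) (out : List (List Int)) : Decidable (Spec_spread_colors grid out) := by unfold Spec_spread_colors; infer_instance

-- ===== CLAIM (what is proved, stated in full; the proofs are below) =====
def Claim_equal_spread_colors : Prop := ∀ (grid : List (List Int)), Dom_spread_colors grid → Pre_spread_colors grid → Spec_spread_colors grid (spread_colors grid)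

-- ===== LEMMAS AND PROOFS =====

-- The proof characterises A's scatter loop as a sequence of writes applied to the
-- grid (last write wins) and shows that, per target cell, the surviving write is
-- exactly the first non-zero neighbor B pulls in its priority order.

def pvStep (res : List (List Int)) (t : Nat × Nat × Int) : List (List Int) :=
  res.set t.1 ((res.getD t.1 []).set t.2.1 t.2.2)
theorem pvStep_row (g : List (List Int)) (t : Nat × Nat × Int) (i : Nat) :
    (pvStep g t).getD i [] = if t.1 = i then (g.getD i []).set t.2.1 t.2.2 else g.getD i [] := by
  unfold pvStep
  by_cases h1 : t.1 = i
  · subst h1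
    by_cases h2 : t.1 < g.length
    · simp [List.getD_eq_getElem?_getD, List.getElem?_set, h2]
    · have hnone : g[t.1]? = none := by
        rw [List.getElem?_eq_none_iff]; omega
      simp [List.getD_eq_getElem?_getD, List.getElem?_set, h2, hnone]
  · simp [List.getD_eq_getElem?_getD, List.getElem?_set, h1]
def pvApply (W : List (Nat × Nat × Int)) (g : List (List Int)) : List (List Int) :=
  W.foldl pvStep g
def pvP (i j : Nat) (t : Nat × Nat × Int) : Bool := t.1 == i && t.2.1 == j
def pvLastVal (L : List (Nat × Nat × Int)) (d : Int) : Int :=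
  match L.getLast? with
  | some t => t.2.2
  | none => d
def pvGV (g : List (List Int)) (r c : Nat) : Int := (g.getD r []).getD c 0
theorem length_pvApply (W : List (Nat × Nat × Int)) (g : List (List Int)) :
    (pvApply W g).length = g.length := by
  induction W generalizing g with
  | nil => rfl
  | cons t W ih =>
    show (pvApply W (pvStep g t)).length = g.length
    rw [ih, pvStep, List.length_set]
theorem row_pvApply (W : List (Nat × Nat × Int)) (g : List (List Int)) (i : Nat) :
    ((pvApply W g).getD i []).length = (g.getD i []).length := by
  induction W generalizing g with
  | nil => rfl
  | cons t W ih =>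
    show ((pvApply W (pvStep g t)).getD i []).length = (g.getD i []).length
    rw [ih, pvStep_row]
    split <;> simp
theorem pvApply_append (W W' : List (Nat × Nat × Int)) (g : List (List Int)) :
    pvApply (W ++ W') g = pvApply W' (pvApply W g) := by
  simp [pvApply, List.foldl_append]

theorem pvApply_getD (W : List (Nat × Nat × Int)) (g : List (List Int)) (i j : Nat)
    (hW : ∀ t ∈ W, t.1 < g.length ∧ t.2.1 < (g.getD t.1 []).length) :
    ((pvApply W g).getD i []).getD j 0 = pvLastVal (W.filter (pvP i j)) (pvGV g i j) := by
  induction W using List.reverseRecOn with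
  | nil => rfl
  | append_singleton W t ih =>
    have hWm : ∀ u ∈ W, u.1 < g.length ∧ u.2.1 < (g.getD u.1 []).length := by
      intro u hu; exact hW u (List.mem_append_left _ hu)
    have ht := hW t (List.mem_append_right _ (List.mem_singleton.mpr rfl))
    rw [show pvApply (W ++ [t]) g = pvStep (pvApply W g) t from by
      rw [pvApply_append]; rfl]
    rw [List.filter_append]
    by_cases hp : pvP i j t
    · obtain ⟨h1, h2⟩ : t.1 = i ∧ t.2.1 = j := by
        simpa [pvP] using hp
      rw [pvStep_row, if_pos h1]
      have hjlen : j < ((pvApply W g).getD i []).length := by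
        rw [row_pvApply]; rw [h1] at ht; omega
      rw [h2, List.getD_eq_getElem?_getD, List.getElem?_set, if_pos rfl, if_pos hjlen]
      simp [pvLastVal, List.filter_cons, hp, List.getLast?_append]
    · have hval : ((pvStep (pvApply W g) t).getD i []).getD j 0
          = (((pvApply W g)).getD i []).getD j 0 := by
        rw [pvStep_row]
        by_cases h1 : t.1 = i
        · rw [if_pos h1]
          have h2 : t.2.1 ≠ j := by
            simp [pvP, h1] at hp; omega
          rw [List.getD_eq_getElem?_getD, List.getElem?_set, if_neg h2,
            ← List.getD_eq_getElem?_getD]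
        · rw [if_neg h1]
      rw [hval, ih hWm]
      simp [pvLastVal, List.filter_cons, hp, List.getLast?_append]

theorem flatMap_range_zero {α : Type} (F : Nat → List α) (n : Nat)
    (h : ∀ c, c < n → F c = []) : (List.range n).flatMap F = [] := by
  rw [List.flatMap_eq_nil_iff]
  intro x hx; exact h x (List.mem_range.mp hx)

theorem flatMap_range_single {α : Type} (F : Nat → List α) (n k : Nat)
    (h : ∀ c, c < n → c ≠ k → F c = []) :
    (List.range n).flatMap F = if k < n then F k else [] := by
  induction n with
  | zero => simp
  | succ n ih =>
    rw [List.range_succ, List.flatMap_append]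
    by_cases hk : k = n
    · rw [flatMap_range_zero F n (fun c hc => h c (by omega) (by omega))]
      simp [hk, show k < n + 1 by omega]
    · rw [ih (fun c hc hne => h c (by omega) hne)]
      have hF : F n = [] := h n (by omega) (by omega)
      by_cases hlt : k < n
      · simp [hlt, hF, show k < n + 1 by omega]
      · simp [hlt, hF, show ¬ k < n + 1 by omega]

theorem flatMap_range_double {α : Type} (F : Nat → List α) (n k1 k2 : Nat) (hlt : k1 < k2)
    (h : ∀ c, c < n → c ≠ k1 → c ≠ k2 → F c = []) :
    (List.range n).flatMap F
      = (if k1 < n then F k1 else []) ++ (if k2 < n then F k2 else []) := by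
  induction n with
  | zero => simp
  | succ n ih =>
    rw [List.range_succ, List.flatMap_append]
    by_cases hk2 : k2 = n
    · rw [flatMap_range_single F n k1 (fun c hc hne => h c (by omega) hne (by omega))]
      simp [show k1 < n by omega, show k1 < n + 1 by omega, show k2 < n + 1 by omega, hk2]
    · by_cases hk1 : k1 = n
      · rw [flatMap_range_zero F n (fun c hc => h c (by omega) (by omega) (by omega))]
        simp [hk1, show k1 < n + 1 by omega, show ¬ k2 < n + 1 by omega]
      · rw [ih (fun c hc => h c (by omega))]
        have hF : F n = [] := h n (by omega) (by omega) (by omega)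
        by_cases h1 : k1 < n
        · by_cases h2 : k2 < n
          · simp [h1, h2, show k1 < n + 1 by omega, show k2 < n + 1 by omega, hF]
          · simp [h1, h2, show k1 < n + 1 by omega, show ¬ k2 < n + 1 by omega, hF]
        · have h2 : ¬ k2 < n := by omega
          simp [h1, h2, show ¬ k1 < n + 1 by omega, show ¬ k2 < n + 1 by omega, hF]

theorem flatMap_range_triple {α : Type} (F : Nat → List α) (n k1 k2 k3 : Nat)
    (h12 : k1 < k2) (h23 : k2 < k3)
    (h : ∀ c, c < n → c ≠ k1 → c ≠ k2 → c ≠ k3 → F c = []) :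
    (List.range n).flatMap F
      = (if k1 < n then F k1 else []) ++ (if k2 < n then F k2 else [])
          ++ (if k3 < n then F k3 else []) := by
  induction n with
  | zero => simp
  | succ n ih =>
    rw [List.range_succ, List.flatMap_append]
    by_cases hk3 : k3 = n
    · rw [flatMap_range_double F n k1 k2 h12 (fun c hc hn1 hn2 => h c (by omega) hn1 hn2 (by omega))]
      simp [show k1 < n by omega, show k2 < n by omega, show k1 < n + 1 by omega,
        show k2 < n + 1 by omega, show k3 < n + 1 by omega, hk3]
    · by_cases hk2 : k2 = n
      · rw [flatMap_range_single F n k1 (fun c hc hn1 => h c (by omega) hn1 (by omega) (by omega))]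
        simp [show k1 < n by omega, show k1 < n + 1 by omega, show k2 < n + 1 by omega,
          show ¬ k3 < n + 1 by omega, hk2]
      · by_cases hk1 : k1 = n
        · rw [flatMap_range_zero F n (fun c hc => h c (by omega) (by omega) (by omega) (by omega))]
          simp [hk1, show k1 < n + 1 by omega, show ¬ k2 < n + 1 by omega,
            show ¬ k3 < n + 1 by omega]
        · rw [ih (fun c hc => h c (by omega))]
          have hF : F n = [] := h n (by omega) (by omega) (by omega) (by omega)
          by_cases h1 : k1 < n
          · by_cases h2 : k2 < n
            · by_cases h3 : k3 < n
              · simp [h1, h2, h3, show k1 < n + 1 by omega, show k2 < n + 1 by omega,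
                  show k3 < n + 1 by omega, hF]
              · simp [h1, h2, h3, show k1 < n + 1 by omega, show k2 < n + 1 by omega,
                  show ¬ k3 < n + 1 by omega, hF]
            · have h3 : ¬ k3 < n := by omega
              simp [h1, h2, h3, show k1 < n + 1 by omega, show ¬ k2 < n + 1 by omega,
                show ¬ k3 < n + 1 by omega, hF]
          · have h2 : ¬ k2 < n := by omega
            have h3 : ¬ k3 < n := by omega
            simp [h1, h2, h3, show ¬ k1 < n + 1 by omega, show ¬ k2 < n + 1 by omega,
              show ¬ k3 < n + 1 by omega, hF]

def pvDirs : List (Int × Int) := [(-1, 0), (1, 0), (0, -1), (0, 1)]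

def pvMk (g : List (List Int)) (h w r c : Nat) (d : Int × Int) : Option (Nat × Nat × Int) :=
  let nr : Int := (r : Int) + d.1
  let nc : Int := (c : Int) + d.2
  if 0 ≤ nr ∧ nr < (h : Int) ∧ 0 ≤ nc ∧ nc < (w : Int) ∧ pvGV g nr.toNat nc.toNat = 0 then
    some (nr.toNat, nc.toNat, pvGV g r c)
  else none

def pvSrcW (g : List (List Int)) (h w r c : Nat) : List (Nat × Nat × Int) :=
  if pvGV g r c ≠ 0 then pvDirs.filterMap (pvMk g h w r c) else []

def pvWrites (g : List (List Int)) (h w : Nat) : List (Nat × Nat × Int) :=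
  (List.range h).flatMap (fun r => (List.range w).flatMap (fun c => pvSrcW g h w r c))

theorem mk_filter_eval (g : List (List Int)) (h w i j r c : Nat) (dr dc : Int)
    (hi : i < h) (hj : j < w) (hbg : pvGV g i j = 0) :
    Option.filter (pvP i j) (pvMk g h w r c (dr, dc))
      = if (r : Int) + dr = (i : Int) ∧ (c : Int) + dc = (j : Int) then
          some (i, j, pvGV g r c)
        else none := by
  have hred : pvMk g h w r c (dr, dc)
      = if 0 ≤ (r : Int) + dr ∧ (r : Int) + dr < (h : Int) ∧
            0 ≤ (c : Int) + dc ∧ (c : Int) + dc < (w : Int) ∧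
            pvGV g ((r : Int) + dr).toNat ((c : Int) + dc).toNat = 0 then
          some (((r : Int) + dr).toNat, ((c : Int) + dc).toNat, pvGV g r c)
        else none := rfl
  rw [hred]
  by_cases htgt : (r : Int) + dr = (i : Int) ∧ (c : Int) + dc = (j : Int)
  · have h1 : ((r : Int) + dr).toNat = i := by omega
    have h2 : ((c : Int) + dc).toNat = j := by omega
    rw [if_pos htgt, if_pos ⟨by omega, by omega, by omega, by omega, by rw [h1, h2]; exact hbg⟩]
    simp [Option.filter, pvP, h1, h2]
  · rw [if_neg htgt]
    by_cases hcond : 0 ≤ (r : Int) + dr ∧ (r : Int) + dr < (h : Int) ∧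
        0 ≤ (c : Int) + dc ∧ (c : Int) + dc < (w : Int) ∧
        pvGV g ((r : Int) + dr).toNat ((c : Int) + dc).toNat = 0
    · rw [if_pos hcond]
      have hne : ¬ (((r : Int) + dr).toNat = i ∧ ((c : Int) + dc).toNat = j) := by omega
      simp only [Option.filter, pvP, decide_eq_true_eq]
      rw [if_neg (by simpa using hne)]
    · rw [if_neg hcond]
      rfl

theorem cell_filter (g : List (List Int)) (h w i j r c : Nat)
    (hi : i < h) (hj : j < w) (hbg : pvGV g i j = 0) :
    (pvSrcW g h w r c).filter (pvP i j)
      = if pvGV g r c ≠ 0 ∧ ((r + 1 = i ∧ c = j) ∨ (r = i ∧ c + 1 = j) ∨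
            (r = i ∧ c = j + 1) ∨ (r = i + 1 ∧ c = j)) then
          [(i, j, pvGV g r c)]
        else [] := by
  unfold pvSrcW
  by_cases hv : pvGV g r c ≠ 0
  · rw [if_pos hv, List.filter_filterMap]
    have e1 := mk_filter_eval g h w i j r c (-1) 0 hi hj hbg
    have e2 := mk_filter_eval g h w i j r c 1 0 hi hj hbg
    have e3 := mk_filter_eval g h w i j r c 0 (-1) hi hj hbg
    have e4 := mk_filter_eval g h w i j r c 0 1 hi hj hbg
    simp only [pvDirs, List.filterMap_cons, List.filterMap_nil, e1, e2, e3, e4]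
    by_cases h1 : r + 1 = i ∧ c = j
    · rw [if_neg (show ¬((r : Int) + -1 = (i : Int) ∧ (c : Int) + 0 = (j : Int)) by omega),
        if_pos (show (r : Int) + 1 = (i : Int) ∧ (c : Int) + 0 = (j : Int) by omega),
        if_neg (show ¬((r : Int) + 0 = (i : Int) ∧ (c : Int) + -1 = (j : Int)) by omega),
        if_neg (show ¬((r : Int) + 0 = (i : Int) ∧ (c : Int) + 1 = (j : Int)) by omega),
        if_pos ⟨hv, Or.inl h1⟩]
    · by_cases h2 : r = i ∧ c + 1 = j
      · rw [if_neg (show ¬((r : Int) + -1 = (i : Int) ∧ (c : Int) + 0 = (j : Int)) by omega),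
          if_neg (show ¬((r : Int) + 1 = (i : Int) ∧ (c : Int) + 0 = (j : Int)) by omega),
          if_neg (show ¬((r : Int) + 0 = (i : Int) ∧ (c : Int) + -1 = (j : Int)) by omega),
          if_pos (show (r : Int) + 0 = (i : Int) ∧ (c : Int) + 1 = (j : Int) by omega),
          if_pos ⟨hv, Or.inr (Or.inl h2)⟩]
      · by_cases h3 : r = i ∧ c = j + 1
        · rw [if_neg (show ¬((r : Int) + -1 = (i : Int) ∧ (c : Int) + 0 = (j : Int)) by omega),
            if_neg (show ¬((r : Int) + 1 = (i : Int) ∧ (c : Int) + 0 = (j : Int)) by omega),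
            if_pos (show (r : Int) + 0 = (i : Int) ∧ (c : Int) + -1 = (j : Int) by omega),
            if_neg (show ¬((r : Int) + 0 = (i : Int) ∧ (c : Int) + 1 = (j : Int)) by omega),
            if_pos ⟨hv, Or.inr (Or.inr (Or.inl h3))⟩]
        · by_cases h4 : r = i + 1 ∧ c = j
          · rw [if_pos (show (r : Int) + -1 = (i : Int) ∧ (c : Int) + 0 = (j : Int) by omega),
              if_neg (show ¬((r : Int) + 1 = (i : Int) ∧ (c : Int) + 0 = (j : Int)) by omega),
              if_neg (show ¬((r : Int) + 0 = (i : Int) ∧ (c : Int) + -1 = (j : Int)) by omega),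
              if_neg (show ¬((r : Int) + 0 = (i : Int) ∧ (c : Int) + 1 = (j : Int)) by omega),
              if_pos ⟨hv, Or.inr (Or.inr (Or.inr h4))⟩]
          · rw [if_neg (show ¬((r : Int) + -1 = (i : Int) ∧ (c : Int) + 0 = (j : Int)) by omega),
              if_neg (show ¬((r : Int) + 1 = (i : Int) ∧ (c : Int) + 0 = (j : Int)) by omega),
              if_neg (show ¬((r : Int) + 0 = (i : Int) ∧ (c : Int) + -1 = (j : Int)) by omega),
              if_neg (show ¬((r : Int) + 0 = (i : Int) ∧ (c : Int) + 1 = (j : Int)) by omega),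
              if_neg (by push_neg; intro _; exact ⟨fun a b => h1 ⟨a, b⟩, fun a b => h2 ⟨a, b⟩,
                fun a b => h3 ⟨a, b⟩, fun a b => h4 ⟨a, b⟩⟩)]
  · rw [if_neg hv]
    simp only [List.filter_nil]
    rw [if_neg (by simp at hv; simp [hv])]

def pvF (g : List (List Int)) (h w i j r c : Nat) : List (Nat × Nat × Int) :=
  if pvGV g r c ≠ 0 ∧ ((r + 1 = i ∧ c = j) ∨ (r = i ∧ c + 1 = j) ∨
      (r = i ∧ c = j + 1) ∨ (r = i + 1 ∧ c = j)) then
    [(i, j, pvGV g r c)]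
  else []

def pvG (g : List (List Int)) (h w i j r : Nat) : List (Nat × Nat × Int) :=
  (List.range w).flatMap (pvF g h w i j r)

theorem ite_ite_and {α : Type} (p q : Prop) [Decidable p] [Decidable q] (x : List α) :
    (if p then (if q then x else []) else []) = if p ∧ q then x else [] := by
  split_ifs <;> simp_all

theorem pvG_up (g : List (List Int)) (h w i j : Nat) (hi1 : 1 ≤ i) (hj : j < w) :
    pvG g h w i j (i - 1)
      = if pvGV g (i - 1) j ≠ 0 then [(i, j, pvGV g (i - 1) j)] else [] := by
  rw [pvG, flatMap_range_single _ w j (by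
    intro c hc hne
    unfold pvF
    rw [if_neg (by rintro ⟨-, hrel⟩; omega)])]
  rw [if_pos hj]
  unfold pvF
  by_cases hv : pvGV g (i - 1) j ≠ 0
  · rw [if_pos ⟨hv, Or.inl ⟨by omega, rfl⟩⟩, if_pos hv]
  · rw [if_neg (fun hx => hv hx.1), if_neg hv]

theorem pvG_down (g : List (List Int)) (h w i j : Nat) (hj : j < w) :
    pvG g h w i j (i + 1)
      = if pvGV g (i + 1) j ≠ 0 then [(i, j, pvGV g (i + 1) j)] else [] := by
  rw [pvG, flatMap_range_single _ w j (by
    intro c hc hne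
    unfold pvF
    rw [if_neg (by rintro ⟨-, hrel⟩; omega)])]
  rw [if_pos hj]
  unfold pvF
  by_cases hv : pvGV g (i + 1) j ≠ 0
  · rw [if_pos ⟨hv, Or.inr (Or.inr (Or.inr ⟨rfl, rfl⟩))⟩, if_pos hv]
  · rw [if_neg (fun hx => hv hx.1), if_neg hv]

theorem pvG_mid (g : List (List Int)) (h w i j : Nat) (hj : j < w) :
    pvG g h w i j i
      = (if 1 ≤ j ∧ pvGV g i (j - 1) ≠ 0 then [(i, j, pvGV g i (j - 1))] else [])
          ++ (if j + 1 < w ∧ pvGV g i (j + 1) ≠ 0 then [(i, j, pvGV g i (j + 1))] else []) := by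
  have hF1 : 1 ≤ j → pvF g h w i j i (j - 1)
      = if pvGV g i (j - 1) ≠ 0 then [(i, j, pvGV g i (j - 1))] else [] := by
    intro hj1
    unfold pvF
    by_cases hv : pvGV g i (j - 1) ≠ 0
    · rw [if_pos ⟨hv, Or.inr (Or.inl ⟨rfl, by omega⟩)⟩, if_pos hv]
    · rw [if_neg (fun hx => hv hx.1), if_neg hv]
  have hF2 : pvF g h w i j i (j + 1)
      = if pvGV g i (j + 1) ≠ 0 then [(i, j, pvGV g i (j + 1))] else [] := by
    unfold pvF
    by_cases hv : pvGV g i (j + 1) ≠ 0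
    · rw [if_pos ⟨hv, Or.inr (Or.inr (Or.inl ⟨rfl, rfl⟩))⟩, if_pos hv]
    · rw [if_neg (fun hx => hv hx.1), if_neg hv]
  by_cases hj1 : 1 ≤ j
  · rw [pvG, flatMap_range_double _ w (j - 1) (j + 1) (by omega) (by
      intro c hc hn1 hn2
      unfold pvF
      rw [if_neg (by rintro ⟨-, hrel⟩; omega)])]
    rw [if_pos (show j - 1 < w by omega), hF1 hj1, hF2]
    rw [ite_ite_and]
    split_ifs <;> simp_all
  · rw [pvG, flatMap_range_single _ w (j + 1) (by
      intro c hc hne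
      unfold pvF
      rw [if_neg (by rintro ⟨-, hrel⟩; omega)])]
    rw [if_neg (show ¬ (1 ≤ j ∧ pvGV g i (j - 1) ≠ 0) from fun hx => hj1 hx.1)]
    rw [hF2, ite_ite_and, List.nil_append]

theorem pvG_zero (g : List (List Int)) (h w i j r : Nat)
    (h1 : r + 1 ≠ i) (h2 : r ≠ i) (h3 : r ≠ i + 1) :
    pvG g h w i j r = [] := by
  rw [pvG]
  apply flatMap_range_zero
  intro c hc
  unfold pvF
  rw [if_neg (by rintro ⟨-, hrel⟩; omega)]

theorem filter_writes (g : List (List Int)) (h w i j : Nat)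
    (hi : i < h) (hj : j < w) (hbg : pvGV g i j = 0) :
    (pvWrites g h w).filter (pvP i j)
      = (if 1 ≤ i ∧ pvGV g (i - 1) j ≠ 0 then [(i, j, pvGV g (i - 1) j)] else [])
        ++ (if 1 ≤ j ∧ pvGV g i (j - 1) ≠ 0 then [(i, j, pvGV g i (j - 1))] else [])
        ++ (if j + 1 < w ∧ pvGV g i (j + 1) ≠ 0 then [(i, j, pvGV g i (j + 1))] else [])
        ++ (if i + 1 < h ∧ pvGV g (i + 1) j ≠ 0 then [(i, j, pvGV g (i + 1) j)] else []) := by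
  rw [pvWrites, List.filter_flatMap]
  have hrow : (fun r => ((List.range w).flatMap (fun c => pvSrcW g h w r c)).filter (pvP i j))
      = pvG g h w i j := by
    funext r
    rw [List.filter_flatMap, pvG]
    congr 1
    funext c
    rw [cell_filter g h w i j r c hi hj hbg]
    rfl
  rw [hrow]
  by_cases hi1 : 1 ≤ i
  · rw [flatMap_range_triple _ h (i - 1) i (i + 1) (by omega) (by omega)
      (fun r hr h1 h2 h3 => pvG_zero g h w i j r (by omega) (by omega) (by omega))]
    rw [if_pos (show i - 1 < h by omega), if_pos hi, pvG_up g h w i j hi1 hj,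
      pvG_mid g h w i j hj, pvG_down g h w i j hj, ite_ite_and]
    split_ifs <;> simp_all [List.append_assoc]
  · rw [flatMap_range_double _ h i (i + 1) (by omega)
      (fun r hr h1 h2 => pvG_zero g h w i j r (by omega) (by omega) (by omega))]
    rw [if_pos hi, pvG_mid g h w i j hj, pvG_down g h w i j hj, ite_ite_and]
    split_ifs <;> simp_all [List.append_assoc]

theorem foldl_opt {α τ β : Type} (mk : α → Option τ) (st : β → τ → β) (L : List α) :
    ∀ (b : β), L.foldl (fun b a => (mk a).elim b (st b)) b
      = (L.filterMap mk).foldl st b := by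
  induction L with
  | nil => intro b; rfl
  | cons a L ih =>
    intro b
    rw [List.foldl_cons, List.filterMap_cons]
    cases hmk : mk a with
    | none => simp only [hmk, Option.elim]; exact ih b
    | some t => simp only [hmk, Option.elim, List.foldl_cons]; exact ih (st b t)

theorem foldl_flat {α τ β : Type} (F : α → List τ) (st : β → τ → β) (L : List α) :
    ∀ (b : β), L.foldl (fun b a => (F a).foldl st b) b = (L.flatMap F).foldl st b := by
  induction L with
  | nil => intro b; rfl
  | cons a L ih =>
    intro b
    rw [List.foldl_cons, List.flatMap_cons, List.foldl_append]
    exact ih _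

theorem portStep_eq (g : List (List Int)) (h w r c : Nat) :
    (fun (result : List (List Int)) (d : Int × Int) =>
      let nr : Int := (r : Int) + d.1
      let nc : Int := (c : Int) + d.2
      if 0 ≤ nr ∧ nr < (h : Int) ∧ 0 ≤ nc ∧ nc < (w : Int) ∧
          (g.getD nr.toNat []).getD nc.toNat 0 = 0 then
        result.set nr.toNat ((result.getD nr.toNat []).set nc.toNat ((g.getD r []).getD c 0))
      else result)
    = (fun result d => (pvMk g h w r c d).elim result (pvStep result)) := by
  funext result d
  rcases d with ⟨dr, dc⟩
  show (if 0 ≤ (r : Int) + dr ∧ (r : Int) + dr < (h : Int) ∧ 0 ≤ (c : Int) + dc ∧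
      (c : Int) + dc < (w : Int) ∧ (g.getD ((r : Int) + dr).toNat []).getD ((c : Int) + dc).toNat 0 = 0 then
    result.set ((r : Int) + dr).toNat ((result.getD ((r : Int) + dr).toNat []).set ((c : Int) + dc).toNat ((g.getD r []).getD c 0))
  else result) = _
  have hred : pvMk g h w r c (dr, dc)
      = if 0 ≤ (r : Int) + dr ∧ (r : Int) + dr < (h : Int) ∧
            0 ≤ (c : Int) + dc ∧ (c : Int) + dc < (w : Int) ∧
            pvGV g ((r : Int) + dr).toNat ((c : Int) + dc).toNat = 0 then
          some (((r : Int) + dr).toNat, ((c : Int) + dc).toNat, pvGV g r c)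
        else none := rfl
  rw [hred]
  unfold pvGV
  split_ifs with hc
  · rfl
  · rfl

theorem spread_colors_eq_apply (g : List (List Int)) (hg : ¬(g = [] ∨ g.headD [] = [])) :
    spread_colors g = pvApply (pvWrites g g.length (g.headD []).length) g := by
  unfold spread_colors
  rw [if_neg hg]
  simp only [portStep_eq, List.map_id_fun', id]
  simp only [foldl_opt]
  have e2 : ∀ (r c : Nat) (res : List (List Int)),
      (if (g.getD r []).getD c 0 ≠ 0 then
        (List.filterMap (pvMk g g.length (g.headD []).length r c)
          [((-1 : Int), (0 : Int)), (1, 0), (0, -1), (0, 1)]).foldl pvStep res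
      else res)
      = (pvSrcW g g.length (g.headD []).length r c).foldl pvStep res := by
    intro r c res
    simp only [pvSrcW, pvGV, pvDirs]
    split_ifs with hv
    · rfl
    · rfl
  simp only [e2]
  simp only [foldl_flat]
  rfl

theorem mem_writes (g : List (List Int)) (h w : Nat) (t : Nat × Nat × Int)
    (ht : t ∈ pvWrites g h w) : t.1 < h ∧ t.2.1 < w ∧ pvGV g t.1 t.2.1 = 0 := by
  simp only [pvWrites, List.mem_flatMap, List.mem_range] at ht
  obtain ⟨r, hr, c, hc, hmem⟩ := ht
  unfold pvSrcW at hmem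
  by_cases hv : pvGV g r c ≠ 0
  · rw [if_pos hv, List.mem_filterMap] at hmem
    obtain ⟨d, hd, hmk⟩ := hmem
    have hred : pvMk g h w r c d
        = if 0 ≤ (r : Int) + d.1 ∧ (r : Int) + d.1 < (h : Int) ∧
              0 ≤ (c : Int) + d.2 ∧ (c : Int) + d.2 < (w : Int) ∧
              pvGV g ((r : Int) + d.1).toNat ((c : Int) + d.2).toNat = 0 then
            some (((r : Int) + d.1).toNat, ((c : Int) + d.2).toNat, pvGV g r c)
          else none := rfl
    rw [hred] at hmk
    split_ifs at hmk with hcond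
    · obtain ⟨h1, h2, h3, h4, h5⟩ := hcond
      injection hmk with hmk2
      rw [← hmk2]
      refine ⟨?_, ?_, h5⟩
      · show ((r : Int) + d.1).toNat < h
        omega
      · show ((c : Int) + d.2).toNat < w
        omega
  · rw [if_neg hv] at hmem
    exact absurd hmem (by simp)

def pvStepB (g : List (List Int)) (h w : Nat) (r : Int) (row new : List Int) (c : Nat) :
    List Int :=
  if row.getD c 0 = 0 then
    (fn_first_neighbor g h w r c [(1, 0), (0, 1), (0, -1), (-1, 0)]).elim new (fun v => new.set c v)
  else new

theorem stepB_eq (g : List (List Int)) (h w : Nat) (r : Int) (row : List Int) :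
    (fun (new : List Int) (c : Nat) =>
      if row.getD c 0 = 0 then
        match fn_first_neighbor g h w r c [(1, 0), (0, 1), (0, -1), (-1, 0)] with
        | some v => new.set c v
        | none => new
      else new) = pvStepB g h w r row := by
  funext new c
  unfold pvStepB
  by_cases hc : row.getD c 0 = 0
  · rw [if_pos hc, if_pos hc]
    cases fn_first_neighbor g h w r c [(1, 0), (0, 1), (0, -1), (-1, 0)] <;> rfl
  · rw [if_neg hc, if_neg hc]

theorem rowB_length (g : List (List Int)) (h w : Nat) (r : Int) (row : List Int)
    (L : List Nat) : ∀ (new : List Int), (L.foldl (pvStepB g h w r row) new).length = new.length := by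
  induction L with
  | nil => intro new; rfl
  | cons c L ih =>
    intro new
    rw [List.foldl_cons, ih]
    unfold pvStepB
    split_ifs
    · cases fn_first_neighbor g h w r c [(1, 0), (0, 1), (0, -1), (-1, 0)] <;> simp
    · rfl

theorem rowB_getD (g : List (List Int)) (h w : Nat) (i : Nat) (row : List Int)
    (hrow : w ≤ row.length) : ∀ (n : Nat), n ≤ w → ∀ (j : Nat),
    ((List.range n).foldl (pvStepB g h w (i : Int) row) row).getD j 0
      = if j < n ∧ row.getD j 0 = 0 then
          (fn_first_neighbor g h w (i : Int) j [(1, 0), (0, 1), (0, -1), (-1, 0)]).elim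
            (row.getD j 0) id
        else row.getD j 0 := by
  intro n
  induction n with
  | zero => intro _ j; simp
  | succ n ih =>
    intro hn j
    rw [List.range_succ, List.foldl_append, List.foldl_cons, List.foldl_nil]
    have hlen : ((List.range n).foldl (pvStepB g h w (i : Int) row) row).length = row.length :=
      rowB_length g h w (i : Int) row _ row
    have happ : ∀ (new : List Int) (c : Nat), pvStepB g h w (i : Int) row new c
        = if row.getD c 0 = 0 then
            (fn_first_neighbor g h w (i : Int) c [(1, 0), (0, 1), (0, -1), (-1, 0)]).elim
              new (fun v => new.set c v)
          else new := fun _ _ => rfl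
    rw [happ]
    by_cases hbgn : row.getD n 0 = 0
    · rw [if_pos hbgn]
      cases hfn : fn_first_neighbor g h w (i : Int) n [(1, 0), (0, 1), (0, -1), (-1, 0)] with
      | none =>
        rw [Option.elim_none, ih (by omega) j]
        by_cases hj : j = n
        · rw [if_neg (show ¬ (j < n ∧ row.getD j 0 = 0) from by omega),
            if_pos (show j < n + 1 ∧ row.getD j 0 = 0 from ⟨by omega, by rw [hj]; exact hbgn⟩),
            hj, hfn, Option.elim_none]
        · by_cases hjn : j < n
          · by_cases hbgj : row.getD j 0 = 0
            · rw [if_pos ⟨hjn, hbgj⟩, if_pos ⟨by omega, hbgj⟩]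
            · rw [if_neg (fun hx => hbgj hx.2), if_neg (fun hx => hbgj hx.2)]
          · rw [if_neg (fun hx => hjn hx.1),
              if_neg (show ¬ (j < n + 1 ∧ row.getD j 0 = 0) from fun hx => by omega)]
      | some v =>
        rw [Option.elim_some]
        by_cases hj : j = n
        · rw [List.getD_eq_getElem?_getD, List.getElem?_set, if_pos hj.symm,
            if_pos (show n < ((List.range n).foldl (pvStepB g h w (i : Int) row) row).length
              from by omega),
            if_pos (show j < n + 1 ∧ row.getD j 0 = 0 from ⟨by omega, by rw [hj]; exact hbgn⟩),
            hj, hfn, Option.elim_some]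
          rfl
        · rw [List.getD_eq_getElem?_getD, List.getElem?_set, if_neg (fun hx => hj hx.symm),
            ← List.getD_eq_getElem?_getD, ih (by omega) j]
          by_cases hjn : j < n
          · by_cases hbgj : row.getD j 0 = 0
            · rw [if_pos ⟨hjn, hbgj⟩, if_pos ⟨by omega, hbgj⟩]
            · rw [if_neg (fun hx => hbgj hx.2), if_neg (fun hx => hbgj hx.2)]
          · rw [if_neg (fun hx => hjn hx.1),
              if_neg (show ¬ (j < n + 1 ∧ row.getD j 0 = 0) from fun hx => by omega)]
    · rw [if_neg hbgn, ih (by omega) j]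
      by_cases hjn : j < n
      · by_cases hbgj : row.getD j 0 = 0
        · rw [if_pos ⟨hjn, hbgj⟩, if_pos ⟨by omega, hbgj⟩]
        · rw [if_neg (fun hx => hbgj hx.2), if_neg (fun hx => hbgj hx.2)]
      · by_cases hj : j = n
        · rw [if_neg (fun hx => hjn hx.1),
            if_neg (show ¬ (j < n + 1 ∧ row.getD j 0 = 0) from fun hx => by
              exact hbgn (by rw [← hj]; exact hx.2))]
        · rw [if_neg (fun hx => hjn hx.1),
            if_neg (show ¬ (j < n + 1 ∧ row.getD j 0 = 0) from fun hx => by omega)]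

theorem fn_eval (g : List (List Int)) (h w i j : Nat) (hi : i < h) (hj : j < w) :
    fn_first_neighbor g h w (i : Int) j [(1, 0), (0, 1), (0, -1), (-1, 0)]
      = if i + 1 < h ∧ pvGV g (i + 1) j ≠ 0 then some (pvGV g (i + 1) j)
        else if j + 1 < w ∧ pvGV g i (j + 1) ≠ 0 then some (pvGV g i (j + 1))
        else if 1 ≤ j ∧ pvGV g i (j - 1) ≠ 0 then some (pvGV g i (j - 1))
        else if 1 ≤ i ∧ pvGV g (i - 1) j ≠ 0 then some (pvGV g (i - 1) j)
        else none := by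
  have e1 : ((i : Int) + 1).toNat = i + 1 := by omega
  have e2 : ((j : Int) + 0).toNat = j := by omega
  have e3 : ((i : Int) + 0).toNat = i := by omega
  have e4 : ((j : Int) + 1).toNat = j + 1 := by omega
  have e5 : ((j : Int) + -1).toNat = j - 1 := by omega
  have e6 : ((i : Int) + -1).toNat = i - 1 := by omega
  have hstep : ∀ (r : Int) (c : Nat) (dr dc : Int) (ds : List (Int × Int)),
      fn_first_neighbor g h w r c ((dr, dc) :: ds)
        = if 0 ≤ r + dr ∧ r + dr < (h : Int) ∧ 0 ≤ (c : Int) + dc ∧ (c : Int) + dc < (w : Int) then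
            (if (g.getD (r + dr).toNat []).getD ((c : Int) + dc).toNat 0 ≠ 0 then
              some ((g.getD (r + dr).toNat []).getD ((c : Int) + dc).toNat 0)
            else fn_first_neighbor g h w r c ds)
          else fn_first_neighbor g h w r c ds := fun _ _ _ _ _ => rfl
  simp only [pvGV]
  have L4 : fn_first_neighbor g h w (i : Int) j [(-1, 0)]
      = if 1 ≤ i ∧ (g.getD (i - 1) []).getD j 0 ≠ 0 then
          some ((g.getD (i - 1) []).getD j 0)
        else none := by
    rw [hstep]
    by_cases hA : 1 ≤ i
    · rw [if_pos ⟨by omega, by omega, by omega, by omega⟩]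
      simp only [e6, e2]
      by_cases hV : (g.getD (i - 1) []).getD j 0 ≠ 0
      · rw [if_pos hV, if_pos ⟨hA, hV⟩]
      · rw [if_neg hV, if_neg (fun hx => hV hx.2)]
        rfl
    · rw [if_neg (by rintro ⟨hb, -⟩; omega), if_neg (fun hx => hA hx.1)]
      rfl
  have L3 : fn_first_neighbor g h w (i : Int) j [(0, -1), (-1, 0)]
      = if 1 ≤ j ∧ (g.getD i []).getD (j - 1) 0 ≠ 0 then
          some ((g.getD i []).getD (j - 1) 0)
        else if 1 ≤ i ∧ (g.getD (i - 1) []).getD j 0 ≠ 0 then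
          some ((g.getD (i - 1) []).getD j 0)
        else none := by
    rw [hstep]
    by_cases hA : 1 ≤ j
    · rw [if_pos ⟨by omega, by omega, by omega, by omega⟩]
      simp only [e3, e5]
      by_cases hV : (g.getD i []).getD (j - 1) 0 ≠ 0
      · rw [if_pos hV, if_pos ⟨hA, hV⟩]
      · rw [if_neg hV, if_neg (fun hx => hV hx.2), L4]
    · rw [if_neg (by rintro ⟨-, -, hb, -⟩; omega), if_neg (fun hx => hA hx.1), L4]
  have L2 : fn_first_neighbor g h w (i : Int) j [(0, 1), (0, -1), (-1, 0)]
      = if j + 1 < w ∧ (g.getD i []).getD (j + 1) 0 ≠ 0 then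
          some ((g.getD i []).getD (j + 1) 0)
        else if 1 ≤ j ∧ (g.getD i []).getD (j - 1) 0 ≠ 0 then
          some ((g.getD i []).getD (j - 1) 0)
        else if 1 ≤ i ∧ (g.getD (i - 1) []).getD j 0 ≠ 0 then
          some ((g.getD (i - 1) []).getD j 0)
        else none := by
    rw [hstep]
    by_cases hA : j + 1 < w
    · rw [if_pos ⟨by omega, by omega, by omega, by omega⟩]
      simp only [e3, e4]
      by_cases hV : (g.getD i []).getD (j + 1) 0 ≠ 0
      · rw [if_pos hV, if_pos ⟨hA, hV⟩]
      · rw [if_neg hV, if_neg (fun hx => hV hx.2), L3]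
    · rw [if_neg (by rintro ⟨-, -, -, hb⟩; omega), if_neg (fun hx => hA hx.1), L3]
  rw [hstep]
  by_cases hA : i + 1 < h
  · rw [if_pos ⟨by omega, by omega, by omega, by omega⟩]
    simp only [e1, e2]
    by_cases hV : (g.getD (i + 1) []).getD j 0 ≠ 0
    · rw [if_pos hV, if_pos ⟨hA, hV⟩]
    · rw [if_neg hV, if_neg (fun hx => hV hx.2), L2]
  · rw [if_neg (by rintro ⟨-, hb, -⟩; omega), if_neg (fun hx => hA hx.1), L2]

theorem chain_vs_fn (g : List (List Int)) (h w i j : Nat) (hi : i < h) (hj : j < w) :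
    pvLastVal
      ((if 1 ≤ i ∧ pvGV g (i - 1) j ≠ 0 then [(i, j, pvGV g (i - 1) j)] else [])
        ++ (if 1 ≤ j ∧ pvGV g i (j - 1) ≠ 0 then [(i, j, pvGV g i (j - 1))] else [])
        ++ (if j + 1 < w ∧ pvGV g i (j + 1) ≠ 0 then [(i, j, pvGV g i (j + 1))] else [])
        ++ (if i + 1 < h ∧ pvGV g (i + 1) j ≠ 0 then [(i, j, pvGV g (i + 1) j)] else []))
      (pvGV g i j)
      = (fn_first_neighbor g h w (i : Int) j [(1, 0), (0, 1), (0, -1), (-1, 0)]).elim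
          (pvGV g i j) id := by
  rw [fn_eval g h w i j hi hj]
  split_ifs <;> simp_all [pvLastVal, List.getLast?_append]

theorem AB_eq (g : List (List Int)) (hpre : Pre_spread_colors g) :
    spread_colors g = spread_colors_alt g := by
  by_cases hg : g = [] ∨ g.headD [] = []
  · unfold spread_colors spread_colors_alt
    rw [if_pos hg, if_pos hg]
  · have hlenrow : ∀ row ∈ g, (g.headD []).length ≤ row.length := by
      rcases hpre with h1 | h2 | h3
      · exact absurd (Or.inl h1) hg
      · exact absurd (Or.inr h2) hg
      · exact h3
    have hW : ∀ t ∈ pvWrites g g.length (g.headD []).length,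
        t.1 < g.length ∧ t.2.1 < (g.getD t.1 []).length := by
      intro t ht
      obtain ⟨h1, h2, h3⟩ := mem_writes _ _ _ t ht
      refine ⟨h1, lt_of_lt_of_le h2 ?_⟩
      rw [List.getD_eq_getElem g [] h1]
      exact hlenrow _ (List.getElem_mem h1)
    apply List.ext_getElem?
    intro i
    rw [spread_colors_eq_apply g hg]
    unfold spread_colors_alt
    rw [if_neg hg]
    by_cases hi : i < g.length
    · have hAlen : i < (pvApply (pvWrites g g.length (g.headD []).length) g).length := by
        rw [length_pvApply]; exact hi
      rw [List.getElem?_eq_getElem hAlen, List.getElem?_map, PySem.List.getElem?_enumerate,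
        List.getElem?_eq_getElem hi]
      simp only [Option.map_some]
      congr 1
      have hrowmem : (g.headD []).length ≤ g[i].length := hlenrow _ (List.getElem_mem hi)
      rw [stepB_eq g g.length (g.headD []).length ((0 : Int) + (i : Nat)) g[i], zero_add]
      -- now compare row of pvApply with the pvStepB fold, elementwise
      have hlenA : (pvApply (pvWrites g g.length (g.headD []).length) g)[i].length
          = g[i].length := by
        have := row_pvApply (pvWrites g g.length (g.headD []).length) g i
        rwa [List.getD_eq_getElem _ [] hAlen, List.getD_eq_getElem g [] hi] at this
      have hlenB : ((List.range (g.headD []).length).foldl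
          (pvStepB g g.length (g.headD []).length (i : Int) g[i]) g[i]).length
          = g[i].length := rowB_length _ _ _ _ _ _ g[i]
      apply List.ext_getElem (by rw [hlenA, hlenB])
      intro j hj1 hj2
      have hjrow : j < g[i].length := by rwa [hlenA] at hj1
      -- A-side value
      have hvalA : (pvApply (pvWrites g g.length (g.headD []).length) g)[i][j]
          = pvLastVal ((pvWrites g g.length (g.headD []).length).filter (pvP i j))
              (pvGV g i j) := by
        rw [← List.getD_eq_getElem _ (0 : Int) hj1]
        rw [← List.getD_eq_getElem _ ([] : List Int) hAlen]
        exact pvApply_getD _ g i j hW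
      -- B-side value
      have hvalB : ((List.range (g.headD []).length).foldl
            (pvStepB g g.length (g.headD []).length (i : Int) g[i]) g[i])[j]
          = if j < (g.headD []).length ∧ g[i].getD j 0 = 0 then
              (fn_first_neighbor g g.length (g.headD []).length (i : Int) j
                [(1, 0), (0, 1), (0, -1), (-1, 0)]).elim (g[i].getD j 0) id
            else g[i].getD j 0 := by
        rw [← List.getD_eq_getElem _ (0 : Int) hj2]
        exact rowB_getD g g.length (g.headD []).length i g[i] hrowmem
          (g.headD []).length le_rfl j
      rw [hvalA, hvalB]
      have hgv : pvGV g i j = g[i].getD j 0 := by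
        rw [pvGV, List.getD_eq_getElem g [] hi]
      by_cases hcase : j < (g.headD []).length ∧ g[i].getD j 0 = 0
      · rw [if_pos hcase]
        rw [filter_writes g g.length (g.headD []).length i j hi hcase.1
          (by rw [hgv]; exact hcase.2)]
        rw [chain_vs_fn g g.length (g.headD []).length i j hi hcase.1, hgv]
      · rw [if_neg hcase]
        have hfilter : (pvWrites g g.length (g.headD []).length).filter (pvP i j) = [] := by
          rw [List.filter_eq_nil_iff]
          intro t ht hp
          obtain ⟨h1, h2, h3⟩ := mem_writes _ _ _ t ht
          obtain ⟨hp1, hp2⟩ : t.1 = i ∧ t.2.1 = j := by simpa [pvP] using hp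
          rw [hp2] at h2
          rw [hp1, hp2] at h3
          rw [hgv] at h3
          exact hcase ⟨h2, h3⟩
        rw [hfilter]
        rw [show pvLastVal [] (pvGV g i j) = pvGV g i j from rfl, hgv]
    · have h1 : (pvApply (pvWrites g g.length (g.headD []).length) g)[i]? = none :=
        List.getElem?_eq_none_iff.mpr (by rw [length_pvApply]; omega)
      rw [h1]
      symm
      rw [List.getElem?_eq_none_iff]
      simp only [List.length_map, PySem.List.length_enumerate]
      omega

-- ===== VERDICT (by name: the statement is the Claim_ definition above) =====
theorem spread_colors_spec : Claim_equal_spread_colors := by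
  intro g _ hpre
  exact AB_eq g hpre
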